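-- pv_equiv track=rewrite | github.com/vitalfocheux/Projet_Init_SAW | python/draw_path.py | int_to_coordinates
-- ===== SOURCE A (Python) =====
-- def int_to_coordinates(digits):
--     x, y = 0, 0
--     x_coords, y_coords = [x], [y]
--
--     for digit in digits:
--         if digit == 3:    # North
--             y += 1
--         elif digit == 1:  # South
--             y -= 1
--         elif digit == 0:  # East
--             x += 1
--         elif digit == 2:  # West
--             x -= 1
--
--         x_coords.append(x)
--         y_coords.append(y)
--
--     return (x_coords, y_coords)
-- ===== SOURCE B (Python) =====
-- def _accumulate(deltas):
--     out = [0]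
--     for d in deltas:
--         out.append(out[-1] + d)
--     return out
--
-- def int_to_coordinates(digits):
--     step = {3: (0, 1), 1: (0, -1), 0: (1, 0), 2: (-1, 0)}
--     deltas = [step.get(d, (0, 0)) for d in digits]
--     x_coords = _accumulate([dx for dx, _ in deltas])
--     y_coords = _accumulate([dy for _, dy in deltas])
--     return (x_coords, y_coords)
-- ===== Notes on version B (the rewrite author's own statement) =====
-- stated objective: idiomatic
-- what changed: Replaces the fused mutate-state append loop with a map of each digit to a (dx,dy) delta via a dict lookup followed by two cumulative-sum scans (prefix sums starting at 0).
import Mathlib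
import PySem

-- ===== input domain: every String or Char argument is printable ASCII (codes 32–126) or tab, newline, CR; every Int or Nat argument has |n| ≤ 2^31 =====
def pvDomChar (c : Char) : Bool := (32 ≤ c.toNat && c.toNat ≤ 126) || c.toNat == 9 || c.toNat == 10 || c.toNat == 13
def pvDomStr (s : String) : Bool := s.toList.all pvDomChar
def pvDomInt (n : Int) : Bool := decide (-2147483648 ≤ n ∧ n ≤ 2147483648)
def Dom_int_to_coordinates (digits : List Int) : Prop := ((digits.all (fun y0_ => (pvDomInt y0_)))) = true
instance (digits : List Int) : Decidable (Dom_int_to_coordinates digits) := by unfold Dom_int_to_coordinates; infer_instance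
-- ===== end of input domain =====

-- ===== PORT A =====
-- Header: B maps digits to (dx,dy) deltas and takes two cumulative sums instead of A's fused append loop (idiomatic decomposition; same cost).
def intToCoordsLoop (x y : Int) (xc yc : List Int) : List Int → List Int × List Int
  | [] => (xc, yc)
  | d :: ds =>
    let p : Int × Int :=
      if d = 3 then (x, y + 1)
      else if d = 1 then (x, y - 1)
      else if d = 0 then (x + 1, y)
      else if d = 2 then (x - 1, y)
      else (x, y)
    intToCoordsLoop p.1 p.2 (xc ++ [p.1]) (yc ++ [p.2]) ds

def int_to_coordinates (digits : List Int) : List Int × List Int :=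
  intToCoordsLoop 0 0 [0] [0] digits

-- ===== PORT B =====
-- step.get(d, (0,0)) of Source B as a function (the dict is a literal; first-match lookup with default)
def pvStep (d : Int) : Int × Int :=
  if d = 3 then (0, 1) else if d = 1 then (0, -1) else if d = 0 then (1, 0)
  else if d = 2 then (-1, 0) else (0, 0)

-- the append loop of _accumulate: carries out[-1]
def pvAccAux (cur : Int) : List Int → List Int
  | [] => []
  | d :: ds => (cur + d) :: pvAccAux (cur + d) ds

def pvAccumulate (deltas : List Int) : List Int := 0 :: pvAccAux 0 deltas

def int_to_coordinates_alt (digits : List Int) : List Int × List Int :=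
  let deltas := digits.map pvStep
  (pvAccumulate (deltas.map Prod.fst), pvAccumulate (deltas.map Prod.snd))

-- ===== PRECONDITION & SPEC =====
def Spec_int_to_coordinates (digits : List Int) (out : List Int × List Int) : Prop := out = int_to_coordinates_alt digits
instance (digits : List Int) (out : List Int × List Int) : Decidable (Spec_int_to_coordinates digits out) := by unfold Spec_int_to_coordinates; infer_instance

-- ===== CLAIM (what is proved, stated in full; the proofs are below) =====
def Claim_equal_int_to_coordinates : Prop := ∀ (digits : List Int), Dom_int_to_coordinates digits → Spec_int_to_coordinates digits (int_to_coordinates digits)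

-- ===== LEMMAS AND PROOFS =====

lemma loop_eq (ds : List Int) : ∀ (x y : Int) (xc yc : List Int),
    intToCoordsLoop x y xc yc ds
      = (xc ++ pvAccAux x (ds.map (fun d => (pvStep d).1)),
         yc ++ pvAccAux y (ds.map (fun d => (pvStep d).2))) := by
  induction ds with
  | nil => intro x y xc yc; simp [intToCoordsLoop, pvAccAux]
  | cons d ds ih =>
    intro x y xc yc
    have hstep : (if d = 3 then (x, y + 1)
      else if d = 1 then (x, y - 1)
      else if d = 0 then (x + 1, y)
      else if d = 2 then (x - 1, y)
      else (x, y)) = (x + (pvStep d).1, y + (pvStep d).2) := by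
      simp only [pvStep]; split_ifs <;> simp <;> ring
    simp only [intToCoordsLoop, hstep, ih, List.map_cons, pvAccAux,
      List.append_assoc, List.singleton_append]


-- ===== VERDICT (by name: the statement is the Claim_ definition above) =====
theorem int_to_coordinates_spec : Claim_equal_int_to_coordinates := by
  intro digits _
  unfold Spec_int_to_coordinates int_to_coordinates int_to_coordinates_alt pvAccumulate
  simp [loop_eq, List.map_map, Function.comp_def]
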